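-- pv_equiv track=rewrite | github.com/in-tandem/algorithm | hacker_rank/special_palindrome.py | is_special_palindrome
-- ===== SOURCE A (Python) =====
-- def is_special_palindrome(pattern):
--
--     all_char_same = True if len(set(pattern)) ==1 else False
--     if len(pattern)%2==0 :
--         return all_char_same
--
--     mid_character  = pattern[len(pattern)//2]
--     without_mid = ''.join([i for i in list(pattern) if i!=mid_character])
--     all_except_mid_same  = True if len(set(without_mid)) ==1 else False
--     is_mid_diff = True if mid_character not in list(without_mid) else False
--
--     return all_char_same or (all_except_mid_same and is_mid_diff)
-- ===== SOURCE B (Python) =====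
-- def is_special_palindrome(pattern):
--     d = len(set(pattern))
--     if len(pattern) % 2 == 0:
--         return d == 1
--     return d <= 2
-- ===== Notes on version B (the rewrite author's own statement) =====
-- stated objective: simpler
-- what changed: B counts distinct characters once and decides purely on parity (even: d==1, odd: d<=2), eliminating A's middle-character lookup, the filtered without_mid string, the second set, and the always-true membership test.
import Mathlib
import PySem

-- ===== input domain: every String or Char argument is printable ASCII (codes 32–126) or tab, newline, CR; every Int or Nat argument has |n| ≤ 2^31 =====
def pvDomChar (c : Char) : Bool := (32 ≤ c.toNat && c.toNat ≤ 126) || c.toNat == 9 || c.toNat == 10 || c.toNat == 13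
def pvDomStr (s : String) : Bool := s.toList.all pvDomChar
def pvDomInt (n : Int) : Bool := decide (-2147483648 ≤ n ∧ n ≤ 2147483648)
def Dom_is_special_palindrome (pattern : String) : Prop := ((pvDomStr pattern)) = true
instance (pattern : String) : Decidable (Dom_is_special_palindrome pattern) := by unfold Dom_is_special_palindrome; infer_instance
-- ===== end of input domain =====

-- B decides purely on the distinct-character count and the parity of the length; return values proved equal to A's everywhere.

-- ===== PORT A =====
def is_special_palindrome (pattern : String) : Bool :=
  let s := pattern.toList
  let all_char_same := if (PySem.Set.ofList s).length == 1 then true else false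
  if PySem.Int.mod (PySem.Str.len pattern) 2 == 0 then all_char_same
  else
    -- pattern[len(pattern)//2]: the length is odd here, so the index is always in range (Python never raises)
    match PySem.List.pyGet? s (PySem.Int.floordiv (PySem.Str.len pattern) 2) with
    | none => false
    | some mid_character =>
      let without_mid := s.filter (fun i => decide (i ≠ mid_character))
      let all_except_mid_same := if (PySem.Set.ofList without_mid).length == 1 then true else false
      let is_mid_diff := if mid_character ∈ without_mid then false else true
      all_char_same || (all_except_mid_same && is_mid_diff)

-- ===== PORT B =====
def is_special_palindrome_alt (pattern : String) : Bool :=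
  let d := (PySem.Set.ofList pattern.toList).length
  if PySem.Int.mod (PySem.Str.len pattern) 2 == 0 then d == 1 else decide (d ≤ 2)

-- ===== PRECONDITION & SPEC =====
def Spec_is_special_palindrome (pattern : String) (out : Bool) : Prop := out = is_special_palindrome_alt pattern
instance (pattern : String) (out : Bool) : Decidable (Spec_is_special_palindrome pattern out) := by unfold Spec_is_special_palindrome; infer_instance

-- ===== CLAIM (what is proved, stated in full; the proofs are below) =====
def Claim_equal_is_special_palindrome : Prop := ∀ (pattern : String), Dom_is_special_palindrome pattern → Spec_is_special_palindrome pattern (is_special_palindrome pattern)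

-- ===== LEMMAS AND PROOFS =====

-- set(filter(≠ m) s) has the same members as set(s) minus m; both are Nodup, so they are a permutation.
lemma ofList_filter_perm_discard (s : List Char) (m : Char) :
    (PySem.Set.ofList (s.filter (fun i => decide (i ≠ m)))).Perm
      (PySem.Set.discard (PySem.Set.ofList s) m) := by
  apply (List.perm_ext_iff_of_nodup (PySem.Set.nodup_ofList _)
    (PySem.Set.nodup_discard _ m (PySem.Set.nodup_ofList s))).mpr
  intro x
  simp [PySem.Set.mem_ofList, PySem.Set.mem_discard, List.mem_filter, and_comm]

-- with m ∈ s, |set(filter(≠ m) s)| = |set(s)| - 1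
lemma length_ofList_filter (s : List Char) (m : Char) (hm : m ∈ s) :
    (PySem.Set.ofList (s.filter (fun i => decide (i ≠ m)))).length + 1
      = (PySem.Set.ofList s).length := by
  rw [(ofList_filter_perm_discard s m).length_eq]
  have hnd := PySem.Set.nodup_ofList (α := Char) s
  have hmem : m ∈ PySem.Set.ofList s := (PySem.Set.mem_ofList s m).mpr hm
  have hdisc : PySem.Set.discard (PySem.Set.ofList s) m
      = (PySem.Set.ofList s).filter (fun y => !(y == m)) := by
    simp [PySem.Set.discard]
  rw [hdisc]
  have hsplit := List.length_eq_length_filter_add (l := PySem.Set.ofList s) (fun y => (y == m))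
  have hcount : ((PySem.Set.ofList s).filter (fun y => (y == m))).length = 1 := by
    rw [← List.count_eq_length_filter]
    exact List.count_eq_one_of_mem hnd hmem
  have hneg : ((PySem.Set.ofList s).filter (fun y => !(y == m))).length
      = (PySem.Set.ofList s).length - 1 := by omega
  omega

-- ===== VERDICT (by name: the statement is the Claim_ definition above) =====
theorem is_special_palindrome_spec : Claim_equal_is_special_palindrome := by
  intro pattern _
  unfold Spec_is_special_palindrome is_special_palindrome is_special_palindrome_alt
  set s := pattern.toList with hs
  have hlen : PySem.Str.len pattern = (s.length : Int) := by simp [PySem.Str.len_eq, hs]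
  rw [hlen]
  have hmod : PySem.Int.mod (s.length : Int) 2 = ((s.length % 2 : Nat) : Int) :=
    PySem.Int.mod_natCast s.length 2
  by_cases hpar : s.length % 2 = 0
  · have hc : (PySem.Int.mod ((s.length : Int)) 2 == 0) = true := by rw [hmod, hpar]; decide
    rw [if_pos hc, if_pos hc]
    by_cases h1 : (PySem.Set.ofList s).length = 1 <;> simp [h1]
  · -- odd length: s.length % 2 = 1, so s.length ≥ 1 and the mid index is in range
    have h1 : s.length % 2 = 1 := by omega
    have hpos : 0 < s.length := by omega
    have hc : (PySem.Int.mod ((s.length : Int)) 2 == 0) = false := by rw [hmod, h1]; decide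
    simp only [hc, Bool.false_eq_true, if_false]
    have hdiv : PySem.Int.floordiv (s.length : Int) 2 = ((s.length / 2 : Nat) : Int) :=
      PySem.Int.floordiv_natCast s.length 2
    have hidx : s.length / 2 < s.length := Nat.div_lt_self hpos (by omega)
    have hget : PySem.List.pyGet? s (PySem.Int.floordiv (↑s.length) 2) = some s[s.length / 2] := by
      rw [hdiv, PySem.List.pyGet?_natCast, List.getElem?_eq_getElem hidx]
    rw [hget]
    have hm : s[s.length / 2] ∈ s := List.getElem_mem hidx
    have hcnt := length_ofList_filter s s[s.length / 2] hm
    have hdpos : 0 < (PySem.Set.ofList s).length :=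
      List.length_pos_of_mem ((PySem.Set.mem_ofList s _).mpr hm)
    by_cases hd1 : (PySem.Set.ofList s).length = 1
    · simp [hd1]
    · by_cases hd2 : (PySem.Set.ofList s).length = 2
      · have he1 : (PySem.Set.ofList (s.filter (fun i => decide (i ≠ s[s.length / 2])))).length = 1 := by omega
        simp only [ne_eq, decide_not] at he1
        simp [hd2, he1]
      · have he1 : (PySem.Set.ofList (s.filter (fun i => decide (i ≠ s[s.length / 2])))).length ≠ 1 := by omega
        simp only [ne_eq, decide_not] at he1
        simp [hd1, he1, show ¬ (PySem.Set.ofList s).length ≤ 2 by omega]
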